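-- pv_equiv track=rewrite | github.com/Hip-po/aoc | day08/day8.py | get_all_chars
-- ===== SOURCE A (Python) =====
-- def get_all_chars(data):
--     all_chars = {}
--     for x, line in enumerate(data):
--         for y, char in enumerate(line):
--             if char not in [".", "\n"]:
--                 if char not in all_chars:
--                     all_chars[char] = []
--                 all_chars[char].append((x, y))
--     return all_chars
-- ===== SOURCE B (Python) =====
-- def get_all_chars(data):
--     cells = [(x, y, c) for x, line in enumerate(data) for y, c in enumerate(line)]
--     keys = []
--     for _, _, c in cells:
--         if c not in (".", "\n") and c not in keys:
--             keys.append(c)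
--     return {k: [(x, y) for x, y, c in cells if c == k] for k in keys}
-- ===== Notes on version B (the rewrite author's own statement) =====
-- stated objective: alternative
-- what changed: Replaces the single-pass incremental dict accumulation with a collect-then-group pipeline: flatten the grid into (x,y,char) cells, compute the distinct non-dot chars in first-occurrence order, then build each key's coordinate list by a comprehension over the flat cell list.
import Mathlib
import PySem

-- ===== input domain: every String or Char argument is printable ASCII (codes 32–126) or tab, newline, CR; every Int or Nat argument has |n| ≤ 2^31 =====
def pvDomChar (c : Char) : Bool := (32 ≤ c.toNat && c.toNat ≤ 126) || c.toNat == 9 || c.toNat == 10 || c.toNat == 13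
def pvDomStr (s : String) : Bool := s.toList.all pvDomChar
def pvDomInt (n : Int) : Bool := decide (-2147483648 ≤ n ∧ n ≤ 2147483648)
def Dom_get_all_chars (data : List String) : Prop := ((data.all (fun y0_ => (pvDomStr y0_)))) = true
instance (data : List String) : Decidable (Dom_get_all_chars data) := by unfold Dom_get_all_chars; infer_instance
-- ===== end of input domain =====

-- B replaces A's single-pass incremental dict accumulation with a collect-then-group pipeline
-- (flat cell list, first-occurrence key list, per-key comprehension); objective: alternative decomposition.

-- ===== PORT A =====
-- 'if char not in all_chars: all_chars[char] = []'
def pvEnsure (d : PySem.Dict String (List (Int × Int))) (char : String) :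
    PySem.Dict String (List (Int × Int)) :=
  if d.contains char then d else d.insert char []

-- A's inner loop body: 'if char not in [".", "\n"]: ensure key; all_chars[char].append((x, y))'
def pvAStep (all_chars : PySem.Dict String (List (Int × Int))) (t : Int × Int × Char) :
    PySem.Dict String (List (Int × Int)) :=
  if String.mk [t.2.2] ≠ "." ∧ String.mk [t.2.2] ≠ "\n" then
    (pvEnsure all_chars (String.mk [t.2.2])).insert (String.mk [t.2.2])
      ((pvEnsure all_chars (String.mk [t.2.2])).getD (String.mk [t.2.2]) [] ++ [(t.1, t.2.1)])
  else all_chars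

def get_all_chars (data : List String) : List (String × List (Int × Int)) :=
  ((PySem.List.enumerate data).foldl (fun all_chars xl =>
    (PySem.List.enumerate xl.2.toList).foldl (fun all_chars yc =>
      pvAStep all_chars (xl.1, yc.1, yc.2)) all_chars)
    (PySem.Dict.empty : PySem.Dict String (List (Int × Int)))).items

-- ===== PORT B =====
def pvCells (data : List String) : List (Int × Int × Char) :=
  (PySem.List.enumerate data).flatMap (fun xl =>
    (PySem.List.enumerate xl.2.toList).map (fun yc => (xl.1, yc.1, yc.2)))

-- B's key-collecting loop body: 'if c not in (".", "\n") and c not in keys: keys.append(c)'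
def pvBStep (ks : List String) (t : Int × Int × Char) : List String :=
  if (String.mk [t.2.2] ≠ "." ∧ String.mk [t.2.2] ≠ "\n") ∧ String.mk [t.2.2] ∉ ks then
    ks ++ [String.mk [t.2.2]]
  else ks

def get_all_chars_alt (data : List String) : List (String × List (Int × Int)) :=
  let cells := pvCells data
  let keys := cells.foldl pvBStep []
  keys.map (fun k =>
    (k, (cells.filter (fun t => String.mk [t.2.2] == k)).map (fun t => (t.1, t.2.1))))

-- ===== PRECONDITION & SPEC =====
def Spec_get_all_chars (data : List String) (out : List (String × List (Int × Int))) : Prop := out = get_all_chars_alt data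
instance (data : List String) (out : List (String × List (Int × Int))) : Decidable (Spec_get_all_chars data out) := by unfold Spec_get_all_chars; infer_instance

-- ===== CLAIM (what is proved, stated in full; the proofs are below) =====
def Claim_equal_get_all_chars : Prop := ∀ (data : List String), Dom_get_all_chars data → Spec_get_all_chars data (get_all_chars data)

-- ===== LEMMAS AND PROOFS =====

-- every key produced by B's key loop is a previous key or a non-dot char
lemma pvBStep_keys_nd (cells : List (Int × Int × Char)) :
    ∀ ks, (∀ k ∈ ks, k ≠ "." ∧ k ≠ "\n") → ∀ k ∈ cells.foldl pvBStep ks, k ≠ "." ∧ k ≠ "\n" := by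
  induction cells with
  | nil => intro ks h k hk; exact h k hk
  | cons t rest ih =>
    intro ks h k hk
    refine ih (pvBStep ks t) ?_ k hk
    intro k' hk'
    unfold pvBStep at hk'
    split at hk'
    · rename_i hc
      rcases List.mem_append.1 hk' with h1 | h1
      · exact h k' h1
      · simp only [List.mem_singleton] at h1; subst h1; exact hc.1
    · exact h k' hk'

lemma pvBStep_nodup (cells : List (Int × Int × Char)) :
    ∀ ks : List String, ks.Nodup → (cells.foldl pvBStep ks).Nodup := by
  induction cells with
  | nil => intro ks h; exact h
  | cons t rest ih =>
    intro ks h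
    refine ih (pvBStep ks t) ?_
    unfold pvBStep
    split
    · rename_i hc
      exact List.Nodup.append h (List.nodup_singleton _) (by simpa using hc.2)
    · exact h

lemma pvBStep_subset (cells : List (Int × Int × Char)) :
    ∀ ks : List String, ks ⊆ cells.foldl pvBStep ks := by
  induction cells with
  | nil => intro ks; exact fun _ h => h
  | cons t rest ih =>
    intro ks
    refine List.Subset.trans ?_ (ih (pvBStep ks t))
    unfold pvBStep
    split
    · exact List.subset_append_left _ _
    · exact fun _ h => h

-- every non-dot char occurring in the cells ends up in the key list
lemma pvBStep_complete (cells : List (Int × Int × Char)) :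
    ∀ ks (t' : Int × Int × Char), t' ∈ cells →
      (String.mk [t'.2.2] ≠ "." ∧ String.mk [t'.2.2] ≠ "\n") →
      String.mk [t'.2.2] ∈ cells.foldl pvBStep ks := by
  induction cells with
  | nil => intro ks t' h; simp at h
  | cons t rest ih =>
    intro ks t' ht' hnd
    rcases List.mem_cons.1 ht' with h1 | h1
    · subst h1
      refine pvBStep_subset rest (pvBStep ks t') ?_
      unfold pvBStep
      split
      · exact List.mem_append.2 (Or.inr (List.mem_singleton.2 rfl))
      · rename_i hc
        rw [Classical.not_and_iff_not_or_not] at hc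
        rcases hc with hc | hc
        · exact absurd hnd hc
        · simpa using hc
    · exact ih (pvBStep ks t) t' h1 hnd

lemma main_lemma (cells : List (Int × Int × Char)) :
    (cells.foldl pvAStep PySem.Dict.empty).items
      = (cells.foldl pvBStep []).map (fun k =>
          (k, (cells.filter (fun t => String.mk [t.2.2] == k)).map (fun t => (t.1, t.2.1)))) := by
  induction cells using List.reverseRecOn with
  | nil => rfl
  | append_singleton cs t ih =>
    rw [List.foldl_append, List.foldl_append]
    simp only [List.foldl_cons, List.foldl_nil]
    set D := cs.foldl pvAStep PySem.Dict.empty with hD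
    set K := cs.foldl pvBStep ([] : List String) with hKdef
    have hKnd : ∀ k ∈ K, k ≠ "." ∧ k ≠ "\n" := pvBStep_keys_nd cs [] (by simp)
    have hKnodup : K.Nodup := pvBStep_nodup cs [] List.nodup_nil
    have hkeys : D.keys = K := by
      have h1 := congrArg (List.map Prod.fst) ih
      rw [List.map_map] at h1
      show List.map Prod.fst D.items = K
      rw [h1]
      exact List.map_id'' (fun _ => rfl) K
    have hDnodup : D.keys.Nodup := hkeys ▸ hKnodup
    set s := String.mk [t.2.2] with hs
    by_cases hnd : s ≠ "." ∧ s ≠ "\n"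
    · by_cases hmem : s ∈ K
      · -- existing key: append to its list
        have hcont : D.contains s = true := by
          rw [PySem.Dict.contains_eq_decide_mem_keys, hkeys]; exact decide_eq_true hmem
        have hitem : (s, (cs.filter (fun q => String.mk [q.2.2] == s)).map (fun q => (q.1, q.2.1))) ∈ D.items := by
          rw [ih]; exact List.mem_map.2 ⟨s, hmem, rfl⟩
        have hgetD := PySem.Dict.getD_of_mem_items D hitem hDnodup []
        have hBK : pvBStep K t = K := by unfold pvBStep; rw [if_neg]; simp [← hs, hmem]
        rw [hBK]
        unfold pvAStep pvEnsure
        simp only [← hs]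
        rw [if_pos hnd, if_pos hcont, hgetD,
          PySem.Dict.items_insert_of_contains D _ hcont, ih, List.map_map]
        refine List.map_congr_left (fun k hk => ?_)
        simp only [Function.comp_apply, List.filter_append, List.map_append]
        by_cases hks : k = s
        · subst hks
          simp [List.filter, hs]
        · have h2 : ¬ (s == k) := by simpa using Ne.symm hks
          have h3 : ¬ (k == s) := by simpa using hks
          simp [List.filter, ← hs, h2, h3]
      · -- fresh key
        have hcont : D.contains s = false := by
          rw [PySem.Dict.contains_eq_decide_mem_keys, hkeys]; exact decide_eq_false hmem
        have hBK : pvBStep K t = K ++ [s] := by unfold pvBStep; simp only [← hs]; rw [if_pos ⟨hnd, hmem⟩]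
        have hnotin : ∀ q ∈ cs, ¬ (String.mk [q.2.2] == s) := by
          intro q hq hqs
          have h4 : String.mk [q.2.2] ∈ K := by
            rw [hKdef]; exact pvBStep_complete cs [] q hq (by rw [eq_of_beq hqs]; exact hnd)
          rw [eq_of_beq hqs] at h4
          exact hmem h4
        unfold pvAStep pvEnsure
        simp only [← hs]
        rw [if_pos hnd, if_neg (by simp [hcont])]
        rw [PySem.Dict.getD_insert_self, PySem.Dict.items_insert_of_contains _ _
          (PySem.Dict.contains_insert_self _ _ _),
          PySem.Dict.items_insert_of_not_contains _ _ hcont]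
        have hfst : ∀ p ∈ D.items, ¬ (p.1 == s) := by
          intro p hp
          have h5 : p.1 ∈ K := hkeys ▸ PySem.Dict.mem_keys_of_mem_items D hp
          intro hb
          exact hmem (by rw [← eq_of_beq hb]; exact h5)
        rw [hBK, List.map_append, List.map_append]
        have hmapid : (D.items.map (fun p => if (p.1 == s) = true then (s, [] ++ [(t.1, t.2.1)]) else p)) = D.items := by
          have h6 : ∀ p ∈ D.items, (if (p.1 == s) = true then (s, [] ++ [(t.1, t.2.1)]) else p) = id p :=
            fun p hp => by rw [if_neg (by simpa using hfst p hp)]; rfl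
          rw [List.map_congr_left h6, List.map_id]
        rw [hmapid]
        congr 1
        · rw [ih]
          refine List.map_congr_left (fun k hk => ?_)
          have hkne : ¬ (s == k) := by
            intro hb
            exact hmem (by rw [eq_of_beq hb]; exact hk)
          simp [List.filter_append, List.filter, ← hs, hkne]
        · have hfil : cs.filter (fun q => String.mk [q.2.2] == s) = [] := by
            rw [List.filter_eq_nil_iff]; intro q hq; simpa using hnotin q hq
          simp [List.filter_append, List.filter, ← hs, hfil]
    · -- dot char: both sides unchanged
      have hA : pvAStep D t = D := by
        unfold pvAStep; simp only [← hs]; rw [if_neg hnd]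
      have hBK : pvBStep K t = K := by
        unfold pvBStep; simp only [← hs]; rw [if_neg]
        rw [Classical.not_and_iff_not_or_not]; left; exact hnd
      rw [hA, hBK, ih]
      refine List.map_congr_left (fun k hk => ?_)
      have hkne : ¬ (s == k) := by
        have hk2 := hKnd k hk
        rw [Classical.not_and_iff_not_or_not] at hnd
        intro hb
        have heq := eq_of_beq hb
        rcases hnd with h | h
        · exact hk2.1 (heq ▸ (not_not.1 h))
        · exact hk2.2 (heq ▸ (not_not.1 h))
      simp [List.filter_append, List.filter, ← hs, hkne]

lemma pv_foldl_ext {α β : Type} (f g : α → β → α) (h : ∀ a b, f a b = g a b)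
    (init : α) (l : List β) : l.foldl f init = l.foldl g init := by
  induction l generalizing init with
  | nil => rfl
  | cons x xs ih => simp only [List.foldl_cons, h, ih]

-- flatten A's nested loop into a fold over the flat cell list
lemma a_flatten (data : List String) :
    get_all_chars data = ((pvCells data).foldl pvAStep PySem.Dict.empty).items := by
  unfold get_all_chars pvCells
  rw [List.foldl_flatMap]
  exact congrArg PySem.Dict.items
    (pv_foldl_ext _ _ (fun d xl => by rw [List.foldl_map]) _ _)

-- ===== VERDICT (by name: the statement is the Claim_ definition above) =====
theorem get_all_chars_spec : Claim_equal_get_all_chars := by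
  intro data _
  unfold Spec_get_all_chars get_all_chars_alt
  rw [a_flatten, main_lemma]
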